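-- pv_equiv track=rewrite | github.com/a-max-22/fp_python | fp8.py | calc_dstance
-- ===== SOURCE A (Python) =====
-- def calc_dstance(speed_and_time, position, speed, time_passed):
--     if position >= len(speed_and_time):
--         return 0
--     if speed is None:
--         speed = speed_and_time[position]
--         return calc_dstance(speed_and_time, position + 1, speed, time_passed)
--     else:
--         current_time = speed_and_time[position]
--         time_delta = current_time - time_passed
--         distance_current = time_delta * speed
--         return distance_current + calc_dstance(speed_and_time, position + 1, None, current_time)
-- ===== SOURCE B (Python) =====
-- def calc_dstance(speed_and_time, position, speed, time_passed):
--     total = 0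
--     for i in range(position, len(speed_and_time)):
--         v = speed_and_time[i]
--         if speed is None:
--             speed = v
--         else:
--             total += (v - time_passed) * speed
--             time_passed = v
--             speed = None
--     return total
-- ===== Notes on version B (the rewrite author's own statement) =====
-- stated objective: idiomatic
-- what changed: Replaced the one-element-per-call recursion threading (position, speed, time_passed) through stack frames by a single iterative for-loop over range(position, len) with an accumulator; same O(n) work but no recursion depth limit.
import Mathlib
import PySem

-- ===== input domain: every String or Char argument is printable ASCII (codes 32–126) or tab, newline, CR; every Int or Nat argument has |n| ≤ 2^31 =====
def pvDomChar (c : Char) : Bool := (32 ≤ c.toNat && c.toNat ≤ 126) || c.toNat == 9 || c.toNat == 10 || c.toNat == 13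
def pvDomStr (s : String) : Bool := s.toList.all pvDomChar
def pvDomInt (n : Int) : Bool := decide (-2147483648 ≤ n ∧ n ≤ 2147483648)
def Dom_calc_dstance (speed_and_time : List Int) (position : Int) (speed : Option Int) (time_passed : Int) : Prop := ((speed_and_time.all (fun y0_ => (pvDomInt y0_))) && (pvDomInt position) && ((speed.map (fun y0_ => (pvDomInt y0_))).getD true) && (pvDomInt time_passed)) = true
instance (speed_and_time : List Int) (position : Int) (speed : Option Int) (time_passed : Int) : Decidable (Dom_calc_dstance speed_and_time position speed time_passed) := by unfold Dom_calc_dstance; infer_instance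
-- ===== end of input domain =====

-- B replaces A's per-element recursion by one iterative loop with an accumulator (same values, no recursion).

-- ===== PORT A =====
-- Indexing is ported with pyGetD 0; exact under Pre_ (every index the code reads is then in range).
def calc_dstance (speed_and_time : List Int) (position : Int) (speed : Option Int) (time_passed : Int) : Int :=
  if (speed_and_time.length : Int) ≤ position then 0
  else
    match speed with
    | none =>
        let s := PySem.List.pyGetD speed_and_time position 0
        calc_dstance speed_and_time (position + 1) (some s) time_passed
    | some s =>
        let current_time := PySem.List.pyGetD speed_and_time position 0
        let time_delta := current_time - time_passed
        let distance_current := time_delta * s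
        distance_current + calc_dstance speed_and_time (position + 1) none current_time
termination_by ((speed_and_time.length : Int) - position).toNat
decreasing_by all_goals simp_all

-- ===== PORT B =====
-- loop body of Source B: state = (total, speed, time_passed)
def pvStepB (speed_and_time : List Int) (st : Int × Option Int × Int) (i : Int) : Int × Option Int × Int :=
  let v := PySem.List.pyGetD speed_and_time i 0
  match st.2.1 with
  | none => (st.1, some v, st.2.2)
  | some s => (st.1 + (v - st.2.2) * s, none, v)

def calc_dstance_alt (speed_and_time : List Int) (position : Int) (speed : Option Int) (time_passed : Int) : Int :=
  ((PySem.List.pyRange position (speed_and_time.length : Int) 1).foldl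
      (pvStepB speed_and_time) (0, speed, time_passed)).1

-- ===== PRECONDITION & SPEC =====
-- Pre_ excludes exactly the inputs where position < -len(speed_and_time): there both A and B raise IndexError.
def Pre_calc_dstance (speed_and_time : List Int) (position : Int) (speed : Option Int) (time_passed : Int) : Prop :=
  -(speed_and_time.length : Int) ≤ position
instance (speed_and_time : List Int) (position : Int) (speed : Option Int) (time_passed : Int) : Decidable (Pre_calc_dstance speed_and_time position speed time_passed) := by unfold Pre_calc_dstance; infer_instance

def pvWitness_calc_dstance : List Int × Int × Option Int × Int := ([3, 7, 2, 10], 0, none, 0)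

def Spec_calc_dstance (speed_and_time : List Int) (position : Int) (speed : Option Int) (time_passed : Int) (out : Int) : Prop := out = calc_dstance_alt speed_and_time position speed time_passed
instance (speed_and_time : List Int) (position : Int) (speed : Option Int) (time_passed : Int) (out : Int) : Decidable (Spec_calc_dstance speed_and_time position speed time_passed out) := by unfold Spec_calc_dstance; infer_instance

-- ===== CLAIM (what is proved, stated in full; the proofs are below) =====
def Claim_equal_calc_dstance : Prop := ∀ (speed_and_time : List Int) (position : Int) (speed : Option Int) (time_passed : Int), Dom_calc_dstance speed_and_time position speed time_passed → Pre_calc_dstance speed_and_time position speed time_passed → Spec_calc_dstance speed_and_time position speed time_passed (calc_dstance speed_and_time position speed time_passed)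

-- ===== LEMMAS AND PROOFS =====

-- Loop invariant: folding B's step from any accumulator adds exactly A's recursive value.
lemma foldB_eq (xs : List Int) (k : Nat) :
    ∀ (p : Int) (sp : Option Int) (tp acc : Int),
      ((xs.length : Int) - p).toNat = k → -(xs.length : Int) ≤ p →
      ((PySem.List.pyRange p (xs.length : Int) 1).foldl (pvStepB xs) (acc, sp, tp)).1
        = acc + calc_dstance xs p sp tp := by
  induction k with
  | zero =>
      intro p sp tp acc hk hp
      have hle : (xs.length : Int) ≤ p := by omega
      rw [PySem.List.pyRange_one_eq_nil hle]
      rw [calc_dstance.eq_def]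
      simp [hle]
  | succ k ih =>
      intro p sp tp acc hk hp
      have hlt : p < (xs.length : Int) := by omega
      rw [PySem.List.pyRange_one_cons hlt]
      rw [calc_dstance.eq_def]
      rw [if_neg (by omega)]
      cases sp with
      | none =>
          simp only [List.foldl_cons, pvStepB]
          rw [ih (p + 1) _ _ _ (by omega) (by omega)]
      | some s =>
          simp only [List.foldl_cons, pvStepB]
          rw [ih (p + 1) _ _ _ (by omega) (by omega)]
          ring

-- ===== VERDICT (by name: the statement is the Claim_ definition above) =====
theorem calc_dstance_spec : Claim_equal_calc_dstance := by
  intro xs p sp tp _ hPre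
  unfold Spec_calc_dstance calc_dstance_alt
  rw [foldB_eq xs ((xs.length : Int) - p).toNat p sp tp 0 rfl hPre]
  ring
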